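-- pv_equiv track=rewrite | github.com/BH-Fang/HomeWork | 114-1/022.py | getRoration
-- ===== SOURCE A (Python) =====
-- def getRoration(LRString : str):
--     rotation = 0
--     for ch in LRString:
--         if ch == 'R':
--             rotation += 1
--         else:
--             rotation -= 1
--         if rotation == -2:
--             rotation = -rotation
--         elif rotation == 3:
--             rotation = -1
--     return rotation
-- ===== SOURCE B (Python) =====
-- def getRoration(LRString: str):
--     net = sum(1 if ch == 'R' else -1 for ch in LRString)
--     return (net + 1) % 4 - 1
-- ===== Notes on version B (the rewrite author's own statement) =====
-- stated objective: simpler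
-- what changed: Replaces A's per-character stateful clamping loop with a single net count of R-vs-other characters followed by one closed-form modular reduction (net+1)%4-1.
import Mathlib
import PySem

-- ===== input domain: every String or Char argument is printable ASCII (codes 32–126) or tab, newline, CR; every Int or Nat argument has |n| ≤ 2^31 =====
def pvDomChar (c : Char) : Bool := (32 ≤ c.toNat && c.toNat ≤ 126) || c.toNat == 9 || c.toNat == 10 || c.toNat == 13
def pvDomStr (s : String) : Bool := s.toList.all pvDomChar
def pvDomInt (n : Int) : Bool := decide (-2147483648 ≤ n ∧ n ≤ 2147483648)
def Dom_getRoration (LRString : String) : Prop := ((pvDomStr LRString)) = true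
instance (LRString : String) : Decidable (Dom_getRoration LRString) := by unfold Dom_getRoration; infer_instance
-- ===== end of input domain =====

-- B replaces A's per-character clamping loop with a net count plus one closed-form modular reduction (simpler).

-- ===== PORT A =====
def getRorationStep (rotation : Int) (ch : Char) : Int :=
  let r := if ch = 'R' then rotation + 1 else rotation - 1
  if r = -2 then -r else if r = 3 then -1 else r

def getRoration (LRString : String) : Int :=
  LRString.toList.foldl getRorationStep 0

-- ===== PORT B =====
def getRoration_alt (LRString : String) : Int :=
  let net := LRString.toList.foldl (fun acc ch => acc + (if ch = 'R' then 1 else -1)) 0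
  PySem.Int.mod (net + 1) 4 - 1

-- ===== PRECONDITION & SPEC =====
def Spec_getRoration (LRString : String) (out : Int) : Prop := out = getRoration_alt LRString
instance (LRString : String) (out : Int) : Decidable (Spec_getRoration LRString out) := by unfold Spec_getRoration; infer_instance

-- ===== CLAIM (what is proved, stated in full; the proofs are below) =====
def Claim_equal_getRoration : Prop := ∀ (LRString : String), Dom_getRoration LRString → Spec_getRoration LRString (getRoration LRString)

-- ===== LEMMAS AND PROOFS =====

theorem getRoration_step_mod (n : Int) (c : Char) :
    getRorationStep (PySem.Int.mod (n + 1) 4 - 1) c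
      = PySem.Int.mod ((n + (if c = 'R' then 1 else -1)) + 1) 4 - 1 := by
  have h1 : PySem.Int.mod (n + 1) 4 = (n + 1) % 4 := PySem.Int.mod_eq_emod_of_pos (by norm_num)
  have h2 : PySem.Int.mod ((n + (if c = 'R' then 1 else -1)) + 1) 4
      = ((n + (if c = 'R' then 1 else -1)) + 1) % 4 :=
    PySem.Int.mod_eq_emod_of_pos (by norm_num)
  simp only [getRorationStep, h1, h2]
  by_cases hc : c = 'R' <;> simp only [hc, if_pos, if_false] <;> split_ifs <;> omega

theorem getRoration_fold (l : List Char) (n : Int) :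
    l.foldl getRorationStep (PySem.Int.mod (n + 1) 4 - 1)
      = PySem.Int.mod ((l.foldl (fun acc ch => acc + (if ch = 'R' then 1 else -1)) n) + 1) 4 - 1 := by
  induction l generalizing n with
  | nil => rfl
  | cons c t ih =>
      simp only [List.foldl_cons, getRoration_step_mod]
      exact ih (n + (if c = 'R' then 1 else -1))

-- ===== VERDICT (by name: the statement is the Claim_ definition above) =====
theorem getRoration_spec : Claim_equal_getRoration := by
  intro s _
  unfold Spec_getRoration getRoration getRoration_alt
  have h0 : (0 : Int) = PySem.Int.mod ((0:Int) + 1) 4 - 1 := by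
    rw [PySem.Int.mod_eq_emod_of_pos (by norm_num)]; decide
  conv_lhs => rw [h0]
  exact getRoration_fold s.toList 0
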